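-- pv_equiv track=rewrite | github.com/najib105q/AdventOfCode | 2025/src/day06/part02.py | simulate_worksheet_vertically
-- ===== SOURCE A (Python) =====
-- from typing import List
--
-- def simulate_worksheet_vertically(lines: List[str]) -> int:
--     width = max(len(line) for line in lines)
--     col = 0
--     blocks = []
--     while col < width:
--         if all(line[col] == " " for line in lines):
--             col += 1
--             continue
--         start = col
--         while col < width and not all(line[col] == " " for line in lines):
--             col += 1
--         blocks.append((start, col))
--     total = 0
--     for start, end in blocks:
--         numbers = []
--         for c in range(end - 1, start - 1, -1):
--             digits = [line[c] for line in lines[:-1]]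
--             num_str = "".join(d for d in digits if d.isdigit())
--             if num_str:
--                 numbers.append(int(num_str))
--         op = lines[-1][start:end].strip()
--         if op == "+":
--             total += sum(numbers)
--         elif op == "*":
--             result = 1
--             for n in numbers:
--                 result *= n
--             total += result
--     return total
-- ===== SOURCE B (Python) =====
-- def _flush(total, cur):
--     s, p, ops = cur
--     if ops == ["+"]:
--         return total + s
--     if ops == ["*"]:
--         return total + p
--     return total
--
--
-- def simulate_worksheet_vertically(lines):
--     width = max(len(line) for line in lines)
--     body, oprow = lines[:-1], lines[-1]
--     total = 0
--     cur = None  # None outside a block, else (running sum, running product, ops seen)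
--     for col in range(width):
--         if all(line[col] == " " for line in lines):
--             if cur is not None:
--                 total = _flush(total, cur)
--                 cur = None
--             continue
--         if cur is None:
--             cur = (0, 1, [])
--         s, p, ops = cur
--         digs = ""
--         for line in body:
--             ch = line[col]
--             if ch.isdigit():
--                 digs += ch
--         if digs:
--             num = int(digs)
--             s, p = s + num, p * num
--         o = oprow[col:col + 1].strip()
--         if o:
--             ops = ops + [o]
--         cur = (s, p, ops)
--     if cur is not None:
--         total = _flush(total, cur)
--     return total
-- ===== Notes on version B (the rewrite author's own statement) =====
-- stated objective: alternative
-- what changed: B replaces A's two-stage algorithm (first scan to collect all (start,end) block intervals, then re-read each block right-to-left building a numbers list and slicing out its operator) by a single left-to-right streaming pass over the columns with a state machine that keeps a running sum, running product and the operator characters seen so far, flushing the current block's contribution at each blank column; no block list, no slicing, no reversal.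
import Mathlib
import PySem

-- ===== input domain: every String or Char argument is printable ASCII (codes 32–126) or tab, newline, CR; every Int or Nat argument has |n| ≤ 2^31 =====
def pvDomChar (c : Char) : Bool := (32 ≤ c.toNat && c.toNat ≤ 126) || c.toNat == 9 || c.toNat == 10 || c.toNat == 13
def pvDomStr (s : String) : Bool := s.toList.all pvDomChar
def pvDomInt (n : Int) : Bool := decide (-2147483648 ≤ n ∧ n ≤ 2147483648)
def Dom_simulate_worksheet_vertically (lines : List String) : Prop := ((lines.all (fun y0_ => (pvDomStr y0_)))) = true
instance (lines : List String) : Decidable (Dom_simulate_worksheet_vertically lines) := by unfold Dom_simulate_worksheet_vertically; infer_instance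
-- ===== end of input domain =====

-- B replaces A's two-stage block scan (find all (start,end) blocks, then re-read each block
-- right-to-left with slicing) by one left-to-right streaming pass over the columns with a
-- state machine (running sum, running product, ops seen so far), flushing at each blank
-- column; proved equal on Pre_ (objective: alternative, same cost).
-- ===== PORT A =====
def pvWidth (lines : List String) : Nat :=
  lines.foldl (fun acc l => max acc l.toList.length) 0

def pvAllSpace (lines : List String) (c : Nat) : Bool :=
  lines.all (fun l => PySem.Str.pyGet? l (c : Int) == some ' ')

def pvSkip (lines : List String) (width c : Nat) : Nat :=
  if h : c < width ∧ pvAllSpace lines c = false then pvSkip lines width (c + 1) else c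
termination_by width - c
decreasing_by omega

-- cited by pvScan's termination proof
theorem pvSkip_le (lines : List String) (width c : Nat) : c ≤ pvSkip lines width c := by
  fun_induction pvSkip <;> omega

theorem pvSkip_gt (lines : List String) (width c : Nat)
    (h1 : c < width) (h2 : pvAllSpace lines c = false) : c < pvSkip lines width c := by
  rw [pvSkip]
  simp only [h1, h2, and_self, dif_pos]
  have := pvSkip_le lines width (c + 1)
  omega

def pvScan (lines : List String) (width c : Nat) : List (Nat × Nat) :=
  if h : c < width then
    if hs : pvAllSpace lines c then pvScan lines width (c + 1)
    else (c, pvSkip lines width c) :: pvScan lines width (pvSkip lines width c)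
  else []
termination_by width - c
decreasing_by
  · omega
  · have := pvSkip_gt lines width c h (by simpa using hs); omega

def pvNumAt (lines : List String) (c : Int) : Option Int :=
  let digits := (lines.dropLast.map (fun l => (PySem.Str.pyGet? l c).getD ' ')).filter PySem.Chars.isdigit
  if digits.isEmpty then none else some ((PySem.Int.ofChars? digits).getD 0)

def pvBlockNums (lines : List String) (s e : Nat) : List Int :=
  (PySem.List.pyRange ((e : Int) - 1) ((s : Int) - 1) (-1)).filterMap (pvNumAt lines)

def pvStepA (lines : List String) (total : Int) (se : Nat × Nat) : Int :=
  let nums := pvBlockNums lines se.1 se.2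
  let op := PySem.Chars.strip (PySem.List.slice ((lines.getLast?.getD "").toList)
      (some (se.1 : Int)) (some (se.2 : Int)))
  if op = ['+'] then total + nums.sum
  else if op = ['*'] then total + nums.foldl (· * ·) 1
  else total

def simulate_worksheet_vertically (lines : List String) : Int :=
  (pvScan lines (pvWidth lines) 0).foldl (pvStepA lines) 0

-- ===== PORT B =====
def pvFlush (total : Int) (cur : Int × Int × List (List Char)) : Int :=
  if cur.2.2 = [['+']] then total + cur.1
  else if cur.2.2 = [['*']] then total + cur.2.1
  else total

def pvStepB (lines body : List String) (oprow : List Char)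
    (st : Int × Option (Int × Int × List (List Char))) (col : Int) :
    Int × Option (Int × Int × List (List Char)) :=
  if lines.all (fun l => PySem.Str.pyGet? l col == some ' ') then
    match st.2 with
    | none => st
    | some cur => (pvFlush st.1 cur, none)
  else
    let cur := st.2.getD (0, 1, [])
    let digs := body.foldl (fun digs l =>
      let ch := PySem.List.pyGetD l.toList col ' '
      if PySem.Chars.isdigit ch then digs ++ [ch] else digs) ([] : List Char)
    let sp : Int × Int :=
      if digs ≠ [] then
        let num := (PySem.Int.ofChars? digs).getD 0
        (cur.1 + num, cur.2.1 * num)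
      else (cur.1, cur.2.1)
    let o := PySem.Chars.strip (PySem.List.slice oprow (some col) (some (col + 1)))
    let ops := if o ≠ [] then cur.2.2 ++ [o] else cur.2.2
    (st.1, some (sp.1, sp.2, ops))

def simulate_worksheet_vertically_alt (lines : List String) : Int :=
  let body := lines.dropLast
  let oprow := (lines.getLast?.getD "").toList
  let fin := (PySem.List.pyRange 0 ((pvWidth lines : Nat) : Int) 1).foldl
      (pvStepB lines body oprow) (0, none)
  match fin.2 with
  | none => fin.1
  | some cur => pvFlush fin.1 cur

-- ===== PRECONDITION & SPEC =====
-- Pre_ is exactly the inputs on which A returns: a non-empty grid, every line but the last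
-- as long as the widest line, and every column past the last line's end having a non-space
-- character in some earlier line (otherwise A's all()/indexing raises IndexError/ValueError).
def Pre_simulate_worksheet_vertically (lines : List String) : Prop :=
  lines ≠ [] ∧
  (∀ l ∈ lines.dropLast, l.toList.length = pvWidth lines) ∧
  (∀ c ∈ List.range (pvWidth lines), (lines.getLast?.getD "").toList.length ≤ c →
      ∃ l ∈ lines.dropLast, l.toList.getD c ' ' ≠ ' ')
instance (lines : List String) : Decidable (Pre_simulate_worksheet_vertically lines) := by
  unfold Pre_simulate_worksheet_vertically; infer_instance

def pvWitness_simulate_worksheet_vertically : List String := ["12", "34", " +"]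

def Spec_simulate_worksheet_vertically (lines : List String) (out : Int) : Prop :=
  out = simulate_worksheet_vertically_alt lines
instance (lines : List String) (out : Int) : Decidable (Spec_simulate_worksheet_vertically lines out) := by
  unfold Spec_simulate_worksheet_vertically; infer_instance

-- ===== CLAIM (what is proved, stated in full; the proofs are below) =====
def Claim_equal_simulate_worksheet_vertically : Prop :=
  ∀ (lines : List String), Dom_simulate_worksheet_vertically lines →
    Pre_simulate_worksheet_vertically lines →
    Spec_simulate_worksheet_vertically lines (simulate_worksheet_vertically lines)

-- ===== LEMMAS AND PROOFS =====

def pvOp (lines : List String) : List Char := (lines.getLast?.getD "").toList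

def pvNW (ch : Char) : Bool := !PySem.Chars.isspace ch

def pvOpAt (oprow : List Char) (d : Nat) : List (List Char) :=
  let o := PySem.Chars.strip (PySem.List.slice oprow (some (d : Int)) (some ((d : Int) + 1)))
  if o ≠ [] then [o] else []

def pvFinish (x : Int × Option (Int × Int × List (List Char))) : Int :=
  match x.2 with
  | none => x.1
  | some cur => pvFlush x.1 cur

def pvG (lines : List String) (st : Int × Option (Int × Int × List (List Char))) (d : Nat) :
    Int × Option (Int × Int × List (List Char)) :=
  pvStepB lines lines.dropLast (pvOp lines) st (d : Int)

-- A-side facts about pvSkip (from its recursion)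
theorem pvSkip_le_width (lines : List String) (width c : Nat) (h : c ≤ width) :
    pvSkip lines width c ≤ width := by
  fun_induction pvSkip <;> omega

theorem pvSkip_not_space (lines : List String) (width c : Nat) :
    ∀ d, c ≤ d → d < pvSkip lines width c → pvAllSpace lines d = false := by
  fun_induction pvSkip with
  | case1 c h ih =>
    intro d h1 h2
    rcases Nat.eq_or_lt_of_le h1 with rfl | hlt
    · exact h.2
    · exact ih d hlt h2
  | case2 c h =>
    intro d h1 h2
    omega

theorem pvSkip_stop (lines : List String) (width c : Nat) :
    pvSkip lines width c < width → pvAllSpace lines (pvSkip lines width c) = true := by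
  fun_induction pvSkip with
  | case1 c h ih => exact ih
  | case2 c h =>
    intro hlt
    cases hb : pvAllSpace lines c
    · exact absurd ⟨hlt, hb⟩ h
    · rfl

-- B's blank test on 1-char slices is A's pvAllSpace (no precondition needed)
theorem pv_slice_one {α : Type} (xs : List α) (c : Nat) :
    PySem.List.slice xs (some (c : Int)) (some ((c : Int) + 1)) = (xs.drop c).take 1 := by
  have h1 : ((c : Int) + 1) = ((c : Int) + ((1 : Nat) : Int)) := by norm_num
  rw [h1, PySem.List.slice_natCast_add]

theorem pv_blank_eq (lines : List String) (c : Nat) :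
    (lines.all (fun l => PySem.Str.pyGet? l ((c : Nat) : Int) == some ' '))
      = pvAllSpace lines c := rfl

-- strip on a 0/1-char list
theorem pv_strip_singleton (x : Char) :
    PySem.Chars.strip [x] = if PySem.Chars.isspace x then [] else [x] := by
  cases h : PySem.Chars.isspace x <;>
    simp [PySem.Chars.strip, PySem.Chars.lstrip, PySem.Chars.rstrip, List.dropWhile, h]

theorem pv_filter_dropWhile (xs : List Char) :
    (List.dropWhile PySem.Chars.isspace xs).filter pvNW = xs.filter pvNW := by
  induction xs with
  | nil => rfl
  | cons x xs ih =>
    cases h : PySem.Chars.isspace x with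
    | true => simp [h, ih, pvNW]
    | false => simp [h, pvNW]

theorem pv_filter_strip (cs : List Char) :
    (PySem.Chars.strip cs).filter pvNW = cs.filter pvNW := by
  unfold PySem.Chars.strip PySem.Chars.rstrip PySem.Chars.lstrip
  rw [List.filter_reverse, pv_filter_dropWhile, List.filter_reverse, List.reverse_reverse,
    pv_filter_dropWhile]

theorem pv_strip_eq_singleton_iff (cs : List Char) (c : Char) (hc : PySem.Chars.isspace c = false) :
    PySem.Chars.strip cs = [c] ↔ cs.filter pvNW = [c] := by
  constructor
  · intro h
    rw [← pv_filter_strip, h, List.filter_cons]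
    simp [pvNW, hc]
  · intro h
    rw [List.filter_eq_cons_iff] at h
    obtain ⟨l1, l2, rfl, h1, h2, h3⟩ := h
    rw [List.filter_eq_nil_iff] at h3
    have hl1 : ∀ x ∈ l1, PySem.Chars.isspace x = true := by
      intro x hx; have := h1 x hx; simpa [pvNW] using this
    have hl2 : ∀ x ∈ l2, PySem.Chars.isspace x = true := by
      intro x hx; have := h3 x hx; simpa [pvNW] using this
    have e1 : List.dropWhile PySem.Chars.isspace l1 = [] :=
      List.dropWhile_eq_nil_iff.mpr hl1
    have e2 : List.dropWhile PySem.Chars.isspace l2.reverse = [] :=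
      List.dropWhile_eq_nil_iff.mpr (fun x hx => hl2 x (List.mem_reverse.mp hx))
    unfold PySem.Chars.strip PySem.Chars.lstrip PySem.Chars.rstrip
    rw [List.dropWhile_append, e1]
    simp only [List.isEmpty_nil, if_pos]
    rw [List.dropWhile_cons_of_neg (by simp [hc])]
    rw [List.reverse_cons, List.dropWhile_append, e2]
    simp [List.dropWhile_cons_of_neg, hc]

-- the per-block op characters B collects are the non-space characters of A's op slice
theorem pv_ops_eq (oprow : List Char) :
    ∀ (k c : Nat), (List.range' c k).flatMap (pvOpAt oprow)
      = ((PySem.List.slice oprow (some (c : Int)) (some ((c : Int) + (k : Int)))).filter pvNW).map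
          (fun a => [a]) := by
  intro k
  induction k with
  | zero =>
    intro c
    rw [PySem.List.slice_natCast_add]
    simp
  | succ k ih =>
    intro c
    have ih' := ih (c+1)
    rw [PySem.List.slice_natCast_add] at ih'
    rw [List.range'_succ, List.flatMap_cons, ih']
    have hsl : PySem.List.slice oprow (some (c : Int)) (some ((c : Int) + ((k+1 : Nat) : Int)))
        = (oprow.drop c).take 1 ++ (oprow.drop (c+1)).take k := by
      rw [PySem.List.slice_natCast_add]
      have h1k : (1 : Nat) + k = k + 1 := by omega
      rw [← h1k, List.take_add, List.drop_drop]
    rw [hsl, List.filter_append, List.map_append]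
    congr 1
    unfold pvOpAt
    rw [pv_slice_one]
    cases hd : oprow.drop c with
    | nil => simp [PySem.Chars.strip, PySem.Chars.lstrip, PySem.Chars.rstrip]
    | cons x xs =>
      rw [show (1:Nat) = 0+1 from rfl, List.take_succ_cons, List.take_zero]
      rw [pv_strip_singleton]
      cases hx : PySem.Chars.isspace x <;> simp [pvNW, hx]

-- B's digit accumulation over the body rows is A's filtered column (body rows have full width)
theorem pv_digs_eq (c : Nat) :
    ∀ (body : List String) (init : List Char), (∀ l ∈ body, c < l.toList.length) →
      body.foldl (fun digs l =>
          let ch := PySem.List.pyGetD l.toList ((c : Nat) : Int) ' '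
          if PySem.Chars.isdigit ch then digs ++ [ch] else digs) init
        = init ++ (body.map (fun l => (PySem.Str.pyGet? l (c : Int)).getD ' ')).filter
            PySem.Chars.isdigit := by
  intro body
  induction body with
  | nil => simp
  | cons l ls ih =>
    intro init hlen
    have hc : c < l.toList.length := hlen l (by simp)
    have hx : l.toList[c]? = some l.toList[c] := List.getElem?_eq_getElem hc
    rw [List.foldl_cons]
    have harg : (let ch := PySem.List.pyGetD l.toList ((c : Nat) : Int) ' '
          if PySem.Chars.isdigit ch then init ++ [ch] else init)
        = init ++ (if PySem.Chars.isdigit l.toList[c] then [l.toList[c]] else []) := by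
      simp only [PySem.List.pyGetD_natCast, List.getD_eq_getElem?_getD, hx, Option.getD_some]
      cases PySem.Chars.isdigit l.toList[c] <;> simp
    rw [harg, ih (init ++ (if PySem.Chars.isdigit l.toList[c] then [l.toList[c]] else []))
      (fun l hl => hlen l (by simp [hl]))]
    simp only [List.map_cons, List.filter_cons, PySem.Str.pyGet?_natCast, hx, Option.getD_some]
    cases PySem.Chars.isdigit l.toList[c] <;> simp

theorem pv_pyRange_neg (s e : Nat) (h : s ≤ e) :
    PySem.List.pyRange ((e : Int) - 1) ((s : Int) - 1) (-1)
      = ((List.range' s (e - s)).map (fun n : Nat => (n : Int))).reverse := by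
  unfold PySem.List.pyRange
  rcases Nat.eq_or_lt_of_le h with rfl | hlt
  · simp
  · have hstop : ((s : Int) - 1) < ((e : Int) - 1) := by omega
    have hcount : (((e : Int) - 1) - ((s : Int) - 1) + -(-1) - 1) / -(-1) = ((e - s : Nat) : Int) := by
      simp only [neg_neg, Int.ediv_one]
      push_cast [h]
      ring
    simp only [if_neg (by norm_num : ¬ ((-1 : Int) = 0)), if_neg (by norm_num : ¬ ((0:Int) < -1)),
      if_pos hstop, hcount, Int.toNat_natCast]
    rw [← List.map_reverse, List.reverse_range', List.map_map]
    apply List.map_congr_left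
    intro k hk
    have hkn : k < e - s := List.mem_range.mp hk
    simp only [Function.comp]
    omega

theorem pv_step_some (lines : List String)
    (hlen : ∀ l ∈ lines.dropLast, l.toList.length = pvWidth lines)
    (c : Nat) (hc : c < pvWidth lines) (hs : pvAllSpace lines c = false)
    (t S P : Int) (O : List (List Char)) :
    pvG lines (t, some (S, P, O)) c
      = (t, some (S + ((pvNumAt lines (c : Int)).elim 0 id),
                  P * ((pvNumAt lines (c : Int)).elim 1 id),
                  O ++ pvOpAt (pvOp lines) c)) := by
  unfold pvG pvStepB
  rw [pv_blank_eq, hs]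
  simp only [Bool.false_eq_true, if_false, Option.getD_some]
  rw [pv_digs_eq c lines.dropLast []
    (fun l hl => by rw [hlen l hl]; exact hc), List.nil_append]
  unfold pvNumAt pvOpAt
  cases hdig : (lines.dropLast.map (fun l => (PySem.Str.pyGet? l (c : Int)).getD ' ')).filter
      PySem.Chars.isdigit with
  | nil =>
    simp only [List.isEmpty_nil, reduceIte, ne_eq, not_true_eq_false]
    cases ho : PySem.Chars.strip (PySem.List.slice (pvOp lines) (some (c : Int))
        (some ((c : Int) + 1))) <;> simp
  | cons d ds =>
    simp only [List.isEmpty_cons, ne_eq, reduceCtorEq, not_false_iff, if_pos, reduceIte]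
    cases ho : PySem.Chars.strip (PySem.List.slice (pvOp lines) (some (c : Int))
        (some ((c : Int) + 1))) <;> simp

theorem pv_block_fold (lines : List String)
    (hlen : ∀ l ∈ lines.dropLast, l.toList.length = pvWidth lines) :
    ∀ (k c : Nat) (t S P : Int) (O : List (List Char)),
      c + k ≤ pvWidth lines →
      (∀ d, c ≤ d → d < c + k → pvAllSpace lines d = false) →
      (List.range' c k).foldl (pvG lines) (t, some (S, P, O))
        = (t, some
            (S + ((List.range' c k).filterMap (fun d : Nat => pvNumAt lines (d : Int))).sum,
             P * ((List.range' c k).filterMap (fun d : Nat => pvNumAt lines (d : Int))).prod,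
             O ++ (List.range' c k).flatMap (pvOpAt (pvOp lines)))) := by
  intro k
  induction k with
  | zero =>
    intro c t S P O _ _
    simp
  | succ k ih =>
    intro c t S P O hw hnb
    rw [List.range'_succ, List.foldl_cons,
      pv_step_some lines hlen c (by omega) (hnb c (by omega) (by omega)) t S P O,
      ih (c+1) t _ _ _ (by omega) (fun d h1 h2 => hnb d (by omega) (by omega))]
    cases hnum : pvNumAt lines (c : Int) <;>
      simp [hnum, List.flatMap_cons, mul_assoc, add_assoc,
        List.append_assoc]

theorem pv_flush_eq (lines : List String) (c e : Nat) (hce : c < e) (t : Int) :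
    pvFlush t
        (((List.range' c (e - c)).filterMap (fun d : Nat => pvNumAt lines (d : Int))).sum,
         ((List.range' c (e - c)).filterMap (fun d : Nat => pvNumAt lines (d : Int))).prod,
         (List.range' c (e - c)).flatMap (pvOpAt (pvOp lines)))
      = pvStepA lines t (c, e) := by
  have hnums : pvBlockNums lines c e
      = ((List.range' c (e - c)).filterMap (fun d : Nat => pvNumAt lines (d : Int))).reverse := by
    unfold pvBlockNums
    rw [pv_pyRange_neg c e (by omega), List.filterMap_reverse, List.filterMap_map]
    exact congrArg _ (List.filterMap_congr (fun _ _ => rfl))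
  have hops := pv_ops_eq (pvOp lines) (e - c) c
  have hcast : ((c : Int) + ((e - c : Nat) : Int)) = ((e : Nat) : Int) := by
    push_cast [Nat.le_of_lt hce]; ring
  rw [hcast] at hops
  have hmap1 : ∀ (l : List Char) (x : Char), (l.map (fun a => [a]) = [[x]]) ↔ l = [x] := by
    intro l x
    cases l with
    | nil => simp
    | cons a as => cases as <;> simp
  have hplus : ((List.range' c (e - c)).flatMap (pvOpAt (pvOp lines)) = [['+']])
      ↔ PySem.Chars.strip (PySem.List.slice (pvOp lines) (some (c : Int)) (some (e : Int))) = ['+'] := by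
    rw [hops, hmap1, pv_strip_eq_singleton_iff _ _ (by decide)]
  have hstar : ((List.range' c (e - c)).flatMap (pvOpAt (pvOp lines)) = [['*']])
      ↔ PySem.Chars.strip (PySem.List.slice (pvOp lines) (some (c : Int)) (some (e : Int))) = ['*'] := by
    rw [hops, hmap1, pv_strip_eq_singleton_iff _ _ (by decide)]
  unfold pvFlush pvStepA
  simp only [hnums]
  rw [show PySem.List.slice ((lines.getLast?.getD "").toList) (some ((c : Nat) : Int))
      (some ((e : Nat) : Int)) = PySem.List.slice (pvOp lines) (some (c : Int)) (some (e : Int))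
      from rfl]
  set N := (List.range' c (e - c)).filterMap (fun d : Nat => pvNumAt lines (d : Int)) with hN
  have hsum : N.reverse.sum = N.sum := List.sum_reverse N
  have hprod : N.reverse.foldl (· * ·) 1 = N.prod := by
    rw [← List.prod_eq_foldl]
    exact List.prod_reverse N
  by_cases h1 : PySem.Chars.strip (PySem.List.slice (pvOp lines) (some (c : Int)) (some (e : Int))) = ['+']
  · rw [if_pos (hplus.mpr h1), if_pos h1, hsum]
  · rw [if_neg (fun hcon => h1 (hplus.mp hcon)), if_neg h1]
    by_cases h2 : PySem.Chars.strip (PySem.List.slice (pvOp lines) (some (c : Int)) (some (e : Int))) = ['*']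
    · rw [if_pos (hstar.mpr h2), if_pos h2, hprod]
    · rw [if_neg (fun hcon => h2 (hstar.mp hcon)), if_neg h2]

theorem pv_step_none (lines : List String) (c : Nat) (t : Int)
    (hs : pvAllSpace lines c = false) :
    pvG lines (t, none) c = pvG lines (t, some (0, 1, [])) c := by
  unfold pvG pvStepB
  rw [pv_blank_eq, hs]
  rfl

theorem pv_main (lines : List String)
    (hlen : ∀ l ∈ lines.dropLast, l.toList.length = pvWidth lines) :
    ∀ (n c : Nat) (t : Int), pvWidth lines - c ≤ n →
      pvFinish ((List.range' c (pvWidth lines - c)).foldl (pvG lines) (t, none))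
        = (pvScan lines (pvWidth lines) c).foldl (pvStepA lines) t := by
  intro n
  induction n with
  | zero =>
    intro c t h
    have h0 : pvWidth lines - c = 0 := by omega
    rw [h0, pvScan, dif_neg (by omega)]
    rfl
  | succ n ih =>
    intro c t h
    by_cases hcW : c < pvWidth lines
    · cases hk : pvAllSpace lines c with
      | true =>
        have hW : pvWidth lines - c = (pvWidth lines - (c + 1)) + 1 := by omega
        rw [hW, List.range'_succ, List.foldl_cons]
        have hstep : pvG lines (t, none) c = (t, none) := by
          unfold pvG pvStepB
          rw [pv_blank_eq, hk]
          rfl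
        rw [hstep, pvScan, dif_pos hcW, dif_pos hk]
        exact ih (c + 1) t (by omega)
      | false =>
        set e := pvSkip lines (pvWidth lines) c with hedef
        have hce : c < e := pvSkip_gt lines (pvWidth lines) c hcW hk
        have heW : e ≤ pvWidth lines := pvSkip_le_width lines (pvWidth lines) c (by omega)
        have hsplit : List.range' c (pvWidth lines - c)
            = List.range' c (e - c) ++ List.range' e (pvWidth lines - e) := by
          have h1 : List.range' c (e - c) ++ List.range' (c + 1 * (e - c)) (pvWidth lines - e)
              = List.range' c ((e - c) + (pvWidth lines - e)) := List.range'_append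
          have h2 : c + 1 * (e - c) = e := by omega
          have h3 : (e - c) + (pvWidth lines - e) = pvWidth lines - c := by omega
          rw [h2, h3] at h1
          exact h1.symm
        rw [hsplit, List.foldl_append]
        have hnb : ∀ d, c ≤ d → d < c + (e - c) → pvAllSpace lines d = false := by
          intro d h1 h2
          exact pvSkip_not_space lines (pvWidth lines) c d h1 (by omega)
        have hfirst : (List.range' c (e - c)).foldl (pvG lines) (t, none)
            = (t, some
                (((List.range' c (e - c)).filterMap (fun d : Nat => pvNumAt lines (d : Int))).sum,
                 ((List.range' c (e - c)).filterMap (fun d : Nat => pvNumAt lines (d : Int))).prod,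
                 (List.range' c (e - c)).flatMap (pvOpAt (pvOp lines)))) := by
          rw [show e - c = (e - c - 1) + 1 by omega, List.range'_succ, List.foldl_cons,
            pv_step_none lines c t hk, ← List.foldl_cons, ← List.range'_succ,
            show (e - c - 1) + 1 = e - c by omega]
          rw [pv_block_fold lines hlen (e - c) c t 0 1 [] (by omega) hnb]
          simp
        rw [hfirst]
        have hscan : pvScan lines (pvWidth lines) c = (c, e) :: pvScan lines (pvWidth lines) e := by
          rw [pvScan, dif_pos hcW, dif_neg (by simp [hk]), ← hedef]
        by_cases he : e < pvWidth lines
        · have hbl : pvAllSpace lines e = true := by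
            rw [hedef]; exact pvSkip_stop lines (pvWidth lines) c he
          rw [show pvWidth lines - e = (pvWidth lines - (e + 1)) + 1 by omega,
            List.range'_succ, List.foldl_cons]
          have hstepe : pvG lines (t, some
              (((List.range' c (e - c)).filterMap (fun d : Nat => pvNumAt lines (d : Int))).sum,
               ((List.range' c (e - c)).filterMap (fun d : Nat => pvNumAt lines (d : Int))).prod,
               (List.range' c (e - c)).flatMap (pvOpAt (pvOp lines)))) e
              = (pvStepA lines t (c, e), none) := by
            unfold pvG pvStepB
            rw [pv_blank_eq, hbl]
            simp only [reduceIte]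
            rw [pv_flush_eq lines c e hce t]
          rw [hstepe, hscan, List.foldl_cons]
          have hscan2 : pvScan lines (pvWidth lines) e = pvScan lines (pvWidth lines) (e + 1) := by
            rw [pvScan, dif_pos he, dif_pos hbl]
          rw [hscan2]
          exact ih (e + 1) (pvStepA lines t (c, e)) (by omega)
        · have he0 : pvWidth lines - e = 0 := by omega
          rw [he0]
          simp only [List.range'_zero, List.foldl_nil]
          rw [hscan, List.foldl_cons]
          have hscan2 : pvScan lines (pvWidth lines) e = [] := by
            rw [pvScan, dif_neg (by omega)]
          rw [hscan2, List.foldl_nil]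
          unfold pvFinish
          exact pv_flush_eq lines c e hce t
    · have h0 : pvWidth lines - c = 0 := by omega
      rw [h0, pvScan, dif_neg (by omega)]
      rfl

-- ===== VERDICT (by name: the statement is the Claim_ definition above) =====
theorem simulate_worksheet_vertically_spec : Claim_equal_simulate_worksheet_vertically := by
  intro lines _ hpre
  unfold Spec_simulate_worksheet_vertically simulate_worksheet_vertically simulate_worksheet_vertically_alt
  have hm := pv_main lines hpre.2.1 (pvWidth lines) 0 0 (by omega)
  simp only [Nat.sub_zero] at hm
  rw [← hm]
  have hrange : PySem.List.pyRange 0 ((pvWidth lines : Nat) : Int) 1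
      = (List.range' 0 (pvWidth lines)).map (fun k : Nat => (k : Int)) := by
    rw [PySem.List.pyRange_one]
    simp [List.range_eq_range']
  rw [hrange]
  simp only [List.foldl_map]
  rfl
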